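-- pv_equiv track=rewrite | github.com/arshnirmal/paper-correction | server/report.py | checks_for_getting_question_number
-- ===== SOURCE A (Python) =====
-- def checks_for_getting_question_number(ans):
--
--     check2 = ans[0].rsplit()[0]
--     zeros = ['o', 'O']
--     ones = ['l', 'i', 'I', 'L', 't', 'T']
--     twos = ['z', 'Z']
--     sixes = ['b']
--     for chars in check2:
--         for zero in zeros:
--             check2 = check2.replace(zero, '0')
--         for one in ones:
--             check2 = check2.replace(one, '1')
--         for two in twos:
--             check2 = check2.replace(two, '2')
--         for six in sixes:
--             check2 = check2.replace(six, '6')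
--
--     return check2
-- ===== SOURCE B (Python) =====
-- def checks_for_getting_question_number(ans):
--     check2 = ans[0].rsplit()[0]
--     mapping = {'o': '0', 'O': '0',
--                'l': '1', 'i': '1', 'I': '1', 'L': '1', 't': '1', 'T': '1',
--                'z': '2', 'Z': '2',
--                'b': '6'}
--     return ''.join(mapping.get(c, c) for c in check2)
-- ===== Notes on version B (the rewrite author's own statement) =====
-- stated objective: idiomatic
-- what changed: Replaces the per-character outer loop with nested full-string replace passes by one precomputed char->char lookup table applied in a single linear join pass.
import Mathlib
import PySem

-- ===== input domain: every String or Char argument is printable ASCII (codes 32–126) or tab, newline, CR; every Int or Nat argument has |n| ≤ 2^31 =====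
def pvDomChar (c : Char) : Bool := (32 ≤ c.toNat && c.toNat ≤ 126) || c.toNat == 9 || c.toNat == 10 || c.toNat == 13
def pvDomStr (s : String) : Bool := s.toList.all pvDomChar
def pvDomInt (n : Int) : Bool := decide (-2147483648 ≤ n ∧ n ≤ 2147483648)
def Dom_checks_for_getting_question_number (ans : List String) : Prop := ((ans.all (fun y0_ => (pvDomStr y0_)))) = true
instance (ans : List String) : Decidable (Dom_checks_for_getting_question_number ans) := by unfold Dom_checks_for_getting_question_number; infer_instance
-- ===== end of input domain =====

-- B replaces A's per-character outer loop of nested whole-string replace passes by a single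
-- precomputed char→char lookup table applied in one linear pass (idiomatic; same return value).


-- ===== PORT A =====
-- one loop body: the four inner `for … in …: check2 = check2.replace(…)` loops, unrolled in order
def pvStepA (s : String) : String :=
  PySem.Str.replace (PySem.Str.replace (PySem.Str.replace (PySem.Str.replace
    (PySem.Str.replace (PySem.Str.replace (PySem.Str.replace (PySem.Str.replace
      (PySem.Str.replace (PySem.Str.replace (PySem.Str.replace s
        "o" "0") "O" "0") "l" "1") "i" "1") "I" "1") "L" "1")
      "t" "1") "T" "1") "z" "2") "Z" "2") "b" "6"

def checks_for_getting_question_number (ans : List String) : String :=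
  match PySem.List.pyGet? ans 0 with
  | none => ""        -- unreachable under Pre_ (Python: IndexError)
  | some a0 =>
    -- rsplit() with no separator yields the same token list as split(); [0] takes its head
    match PySem.Str.split₀ a0 with
    | [] => ""        -- unreachable under Pre_ (Python: IndexError)
    | check2 :: _ =>
      -- `for chars in check2:` iterates once per character of the ORIGINAL check2
      check2.toList.foldl (fun s _ => pvStepA s) check2

-- ===== PORT B =====
def pvTblB : PySem.Dict Char Char :=
  PySem.Dict.ofList [('o','0'), ('O','0'), ('l','1'), ('i','1'), ('I','1'), ('L','1'),
                     ('t','1'), ('T','1'), ('z','2'), ('Z','2'), ('b','6')]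

def checks_for_getting_question_number_alt (ans : List String) : String :=
  match PySem.List.pyGet? ans 0 with
  | none => ""        -- unreachable under Pre_ (Python: IndexError)
  | some a0 =>
    match PySem.Str.split₀ a0 with
    | [] => ""        -- unreachable under Pre_ (Python: IndexError)
    | check2 :: _ =>
      -- ''.join(mapping.get(c, c) for c in check2): join of one-char strings = String.ofList of the map
      String.ofList (check2.toList.map (fun c => pvTblB.getD c c))

-- ===== PRECONDITION & SPEC =====
-- Pre_ excludes exactly the inputs on which Python A raises IndexError:
-- an empty list, or a first string with no whitespace-separated token.
def Pre_checks_for_getting_question_number (ans : List String) : Prop :=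
  ans ≠ [] ∧ PySem.Str.split₀ ans.headI ≠ []

instance (ans : List String) : Decidable (Pre_checks_for_getting_question_number ans) := by
  unfold Pre_checks_for_getting_question_number; infer_instance

def pvWitness_checks_for_getting_question_number : List String := ["Iz3b answer"]

def Spec_checks_for_getting_question_number (ans : List String) (out : String) : Prop := out = checks_for_getting_question_number_alt ans
instance (ans : List String) (out : String) : Decidable (Spec_checks_for_getting_question_number ans out) := by unfold Spec_checks_for_getting_question_number; infer_instance

-- ===== CLAIM (what is proved, stated in full; the proofs are below) =====
def Claim_equal_checks_for_getting_question_number : Prop := ∀ (ans : List String), Dom_checks_for_getting_question_number ans → Pre_checks_for_getting_question_number ans → Spec_checks_for_getting_question_number ans (checks_for_getting_question_number ans)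

-- ===== LEMMAS AND PROOFS =====

-- B's table lookup as a plain function, and its closed form
def pvG (c : Char) : Char := pvTblB.getD c c

def pvF (c : Char) : Char :=
  if c = 'o' ∨ c = 'O' then '0'
  else if c = 'l' ∨ c = 'i' ∨ c = 'I' ∨ c = 'L' ∨ c = 't' ∨ c = 'T' then '1'
  else if c = 'z' ∨ c = 'Z' then '2'
  else if c = 'b' then '6'
  else c

theorem pvF_eq0 (c : Char) (h : c = 'o' ∨ c = 'O') : pvF c = '0' := by
  unfold pvF; rw [if_pos h]

theorem pvF_eq1 (c : Char) (h0 : ¬(c = 'o' ∨ c = 'O'))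
    (h : c = 'l' ∨ c = 'i' ∨ c = 'I' ∨ c = 'L' ∨ c = 't' ∨ c = 'T') : pvF c = '1' := by
  unfold pvF; rw [if_neg h0, if_pos h]

theorem pvF_eq2 (c : Char) (h0 : ¬(c = 'o' ∨ c = 'O'))
    (h1 : ¬(c = 'l' ∨ c = 'i' ∨ c = 'I' ∨ c = 'L' ∨ c = 't' ∨ c = 'T'))
    (h : c = 'z' ∨ c = 'Z') : pvF c = '2' := by
  unfold pvF; rw [if_neg h0, if_neg h1, if_pos h]

theorem pvF_eq6 (c : Char) (h0 : ¬(c = 'o' ∨ c = 'O'))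
    (h1 : ¬(c = 'l' ∨ c = 'i' ∨ c = 'I' ∨ c = 'L' ∨ c = 't' ∨ c = 'T'))
    (h2 : ¬(c = 'z' ∨ c = 'Z')) (h : c = 'b') : pvF c = '6' := by
  unfold pvF; rw [if_neg h0, if_neg h1, if_neg h2, if_pos h]

theorem pvF_id (c : Char) (h0 : ¬(c = 'o' ∨ c = 'O'))
    (h1 : ¬(c = 'l' ∨ c = 'i' ∨ c = 'I' ∨ c = 'L' ∨ c = 't' ∨ c = 'T'))
    (h2 : ¬(c = 'z' ∨ c = 'Z')) (h3 : ¬ c = 'b') : pvF c = c := by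
  unfold pvF; rw [if_neg h0, if_neg h1, if_neg h2, if_neg h3]

theorem pvTblB_mk : pvTblB = PySem.Dict.mk
    [('o','0'), ('O','0'), ('l','1'), ('i','1'), ('I','1'), ('L','1'),
     ('t','1'), ('T','1'), ('z','2'), ('Z','2'), ('b','6')] := by decide

theorem pvG_eq (c : Char) : pvG c = pvF c := by
  unfold pvF
  split_ifs with h0 h1 h2 h3
  · rcases h0 with h | h <;> subst h <;> decide
  · rcases h1 with h | h | h | h | h | h <;> subst h <;> decide
  · rcases h2 with h | h <;> subst h <;> decide
  · subst h3; decide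
  · simp only [not_or] at h0 h1 h2
    have hk : ∀ k : Char, c ≠ k → (k == c) = false :=
      fun k hne => beq_eq_false_iff_ne.mpr (Ne.symm hne)
    simp [pvG, pvTblB_mk, PySem.Dict.getD,
          hk _ h0.1, hk _ h0.2, hk _ h1.1, hk _ h1.2.1, hk _ h1.2.2.1, hk _ h1.2.2.2.1,
          hk _ h1.2.2.2.2.1, hk _ h1.2.2.2.2.2, hk _ h2.1, hk _ h2.2, hk _ h3,
          PySem.Dict.get?]

-- single-character replacement as a named per-character function
def pvRep (c d x : Char) : Char := if x = c then d else x

theorem pvRep_ne {x c : Char} (d : Char) (h : x ≠ c) : pvRep c d x = x := by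
  simp [pvRep, h]

-- single-character replace is a map
theorem pv_go_single (c d : Char) : ∀ (fuel : Nat) (l acc : List Char), l.length ≤ fuel →
    PySem.Chars.replace.go [c] [d] fuel l acc
      = acc.reverse ++ l.map (fun x => if x = c then d else x) := by
  intro fuel
  induction fuel with
  | zero =>
    intro l acc h
    have : l = [] := List.eq_nil_of_length_eq_zero (Nat.le_zero.mp h)
    subst this; simp [PySem.Chars.replace.go]
  | succ n ih =>
    intro l acc h
    cases l with
    | nil => simp [PySem.Chars.replace.go]
    | cons x t =>
      simp only [PySem.Chars.replace.go]
      simp only [List.length_cons] at h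
      by_cases hx : x = c
      · subst hx
        have hp : List.isPrefixOf [x] (x :: t) = true := by simp [List.isPrefixOf]
        rw [if_pos hp]
        have hd : List.drop (List.length [x]) (x :: t) = t := rfl
        rw [hd, ih _ _ (by omega)]
        simp
      · have hp : List.isPrefixOf [c] (x :: t) = false := by
          simp [List.isPrefixOf]; exact fun hw => absurd hw.symm hx
        rw [if_neg (by simp [hp])]
        rw [ih _ _ (by omega)]
        simp [hx]

theorem pv_replace_single (s : List Char) (c d : Char) :
    PySem.Chars.replace s [c] [d] = s.map (pvRep c d) := by
  simp only [PySem.Chars.replace]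
  rw [if_neg (by simp)]
  simpa [pvRep] using pv_go_single c d s.length s [] le_rfl

-- one pass of A's replacement chain maps each character through the table's closed form
set_option maxHeartbeats 1000000 in
theorem pv_stepA_toList (s : String) : (pvStepA s).toList = s.toList.map pvF := by
  have e0 : ("o" : String).toList = ['o'] := by decide
  have e1 : ("0" : String).toList = ['0'] := by decide
  have e2 : ("O" : String).toList = ['O'] := by decide
  have e3 : ("l" : String).toList = ['l'] := by decide
  have e4 : ("1" : String).toList = ['1'] := by decide
  have e5 : ("i" : String).toList = ['i'] := by decide
  have e6 : ("I" : String).toList = ['I'] := by decide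
  have e7 : ("L" : String).toList = ['L'] := by decide
  have e8 : ("t" : String).toList = ['t'] := by decide
  have e9 : ("T" : String).toList = ['T'] := by decide
  have e10 : ("z" : String).toList = ['z'] := by decide
  have e11 : ("2" : String).toList = ['2'] := by decide
  have e12 : ("Z" : String).toList = ['Z'] := by decide
  have e13 : ("b" : String).toList = ['b'] := by decide
  have e14 : ("6" : String).toList = ['6'] := by decide
  simp only [pvStepA, PySem.Str.toList_replace, e0, e1, e2, e3, e4, e5, e6, e7, e8, e9, e10, e11, e12, e13, e14]
  simp only [pv_replace_single, List.map_map]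
  refine List.map_congr_left fun x _ => ?_
  simp only [Function.comp_apply]
  by_cases h0 : x = 'o' ∨ x = 'O'
  · rcases h0 with h | h <;> subst h <;> decide
  by_cases h1 : x = 'l' ∨ x = 'i' ∨ x = 'I' ∨ x = 'L' ∨ x = 't' ∨ x = 'T'
  · rcases h1 with h | h | h | h | h | h <;> subst h <;> decide
  by_cases h2 : x = 'z' ∨ x = 'Z'
  · rcases h2 with h | h <;> subst h <;> decide
  by_cases h3 : x = 'b'
  · subst h3; decide
  · rw [pvF_id x h0 h1 h2 h3]
    simp only [not_or] at h0 h1 h2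
    rw [pvRep_ne '0' h0.1, pvRep_ne '0' h0.2, pvRep_ne '1' h1.1, pvRep_ne '1' h1.2.1,
        pvRep_ne '1' h1.2.2.1, pvRep_ne '1' h1.2.2.2.1, pvRep_ne '1' h1.2.2.2.2.1,
        pvRep_ne '1' h1.2.2.2.2.2, pvRep_ne '2' h2.1, pvRep_ne '2' h2.2, pvRep_ne '6' h3]

-- the table is idempotent (its outputs are digits, which it leaves alone)
theorem pv_f_idem (c : Char) : pvF (pvF c) = pvF c := by
  by_cases h0 : c = 'o' ∨ c = 'O'
  · rw [pvF_eq0 c h0]; decide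
  by_cases h1 : c = 'l' ∨ c = 'i' ∨ c = 'I' ∨ c = 'L' ∨ c = 't' ∨ c = 'T'
  · rw [pvF_eq1 c h0 h1]; decide
  by_cases h2 : c = 'z' ∨ c = 'Z'
  · rw [pvF_eq2 c h0 h1 h2]; decide
  by_cases h3 : c = 'b'
  · rw [pvF_eq6 c h0 h1 h2 h3]; decide
  · rw [pvF_id c h0 h1 h2 h3, pvF_id c h0 h1 h2 h3]

theorem pv_stepA_idem (s : String) : pvStepA (pvStepA s) = pvStepA s := by
  apply String.toList_inj.mp
  rw [pv_stepA_toList, pv_stepA_toList, List.map_map]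
  exact List.map_congr_left fun x _ => pv_f_idem x

theorem pv_foldl_stepA (l : List Char) (s : String) :
    l.foldl (fun a _ => pvStepA a) (pvStepA s) = pvStepA s := by
  induction l with
  | nil => rfl
  | cons x t ih => rw [List.foldl_cons, pv_stepA_idem]; exact ih

-- ===== VERDICT (by name: the statement is the Claim_ definition above) =====
theorem checks_for_getting_question_number_spec : Claim_equal_checks_for_getting_question_number := by
  intro ans _ hpre
  unfold Spec_checks_for_getting_question_number
  unfold checks_for_getting_question_number checks_for_getting_question_number_alt
  obtain ⟨hne, hsp⟩ := hpre
  cases ans with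
  | nil => exact absurd rfl hne
  | cons a0 rest =>
    simp only [show PySem.List.pyGet? (a0 :: rest) 0 = some a0 from by
      simp [PySem.List.pyGet?, PySem.List.pyIdx?]]
    cases hs : PySem.Str.split₀ a0 with
    | nil => exact absurd hs (by simpa using hsp)
    | cons check2 _ =>
      show check2.toList.foldl (fun s _ => pvStepA s) check2
            = String.ofList (check2.toList.map (fun c => pvTblB.getD c c))
      have hfg : (fun c => pvTblB.getD c c) = pvF := funext fun c => pvG_eq c
      cases hc : check2.toList with
      | nil =>
        have he : check2 = "" := String.toList_inj.mp (by simp [hc])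
        subst he; decide
      | cons x t =>
        apply String.toList_inj.mp
        rw [List.foldl_cons, pv_foldl_stepA, pv_stepA_toList, String.toList_ofList, hfg, hc]
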